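-- pv_equiv track=rewrite | github.com/srijan1/reels-generator | grok_script_generator.py | analyze_topic_and_create_context
-- ===== SOURCE A (Python) =====
-- def analyze_topic_and_create_context(story_topic, audience):
--     """Analyze the topic and create specific context for the story"""
--     topic_lower = story_topic.lower()
--
--     # Topic-specific context mapping
--     topic_contexts = {
--         # Personal growth topics
--         "hero's journey": "A transformative adventure where an ordinary person faces extraordinary challenges and emerges changed. Include specific trials, mentors, and moments of self-discovery.",
--
--         "overcoming fear": "A deeply personal story about confronting specific fears and finding courage. Include the physical and emotional experience of fear, and the moment of breakthrough.",
--
--         "friendship": "An authentic story about human connection, loyalty, and mutual support. Include specific moments of bonding, conflict resolution, and shared experiences.",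
--
--         "finding purpose": "A journey of self-discovery and meaning-making. Include moments of confusion, exploration, breakthrough insights, and purposeful action.",
--
--         # Adventure topics
--         "travel adventure": "A specific journey to a real or imagined place with unique challenges and discoveries. Include cultural encounters, unexpected obstacles, and transformative experiences.",
--
--         "survival story": "A gripping tale of overcoming extreme circumstances using wit, determination, and resourcefulness. Include specific survival challenges and problem-solving moments.",
--
--         # Emotional topics
--         "love story": "An authentic romance focusing on emotional connection, personal growth, and relationship challenges. Include specific moments of attraction, conflict, and resolution.",
--
--         "family bonds": "A story exploring family relationships, traditions, conflicts, and unconditional love. Include specific family dynamics and generational perspectives.",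
--
--         # Creative topics
--         "artistic journey": "A story about creative expression, artistic struggle, and breakthrough moments. Include specific artistic challenges, inspiration, and the creative process.",
--
--         "innovation": "A story about problem-solving, invention, and bringing new ideas to life. Include specific technical challenges, creative solutions, and implementation."
--     }
--
--     # Look for exact matches first
--     for key, context in topic_contexts.items():
--         if key in topic_lower:
--             return context
--
--     # Look for partial matches
--     for key, context in topic_contexts.items():
--         if any(word in topic_lower for word in key.split()):
--             return context
--
--     # Generic context based on common themes
--     if any(word in topic_lower for word in ['journey', 'adventure', 'travel', 'exploration']):
--         return f"An adventure story specifically about {story_topic}. Include unique challenges, discoveries, and transformative experiences that are specific to this particular journey."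
--
--     elif any(word in topic_lower for word in ['love', 'relationship', 'romance', 'connection']):
--         return f"A relationship story specifically about {story_topic}. Include authentic emotional moments, personal growth, and the unique aspects of this particular relationship dynamic."
--
--     elif any(word in topic_lower for word in ['fear', 'courage', 'overcome', 'challenge']):
--         return f"A story of personal growth specifically about {story_topic}. Include the emotional journey, specific obstacles, and moments of breakthrough and transformation."
--
--     else:
--         return f"A unique story specifically about {story_topic}. Include distinctive elements, specific scenarios, and detailed imagery that could only apply to {story_topic}. Make every aspect of the story directly relevant to this particular topic."
-- ===== SOURCE B (Python) =====
-- def analyze_topic_and_create_context(story_topic, audience):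
--     """Analyze the topic and create specific context for the story.
--
--     Scores every table entry (2 = full-key substring, 1 = word match, 0 = none)
--     and keeps the best-scoring earliest entry in one pass; the generic themes
--     are data, scanned by a small loop."""
--     topic_lower = story_topic.lower()
--
--     topic_contexts = {
--         "hero's journey": "A transformative adventure where an ordinary person faces extraordinary challenges and emerges changed. Include specific trials, mentors, and moments of self-discovery.",
--         "overcoming fear": "A deeply personal story about confronting specific fears and finding courage. Include the physical and emotional experience of fear, and the moment of breakthrough.",
--         "friendship": "An authentic story about human connection, loyalty, and mutual support. Include specific moments of bonding, conflict resolution, and shared experiences.",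
--         "finding purpose": "A journey of self-discovery and meaning-making. Include moments of confusion, exploration, breakthrough insights, and purposeful action.",
--         "travel adventure": "A specific journey to a real or imagined place with unique challenges and discoveries. Include cultural encounters, unexpected obstacles, and transformative experiences.",
--         "survival story": "A gripping tale of overcoming extreme circumstances using wit, determination, and resourcefulness. Include specific survival challenges and problem-solving moments.",
--         "love story": "An authentic romance focusing on emotional connection, personal growth, and relationship challenges. Include specific moments of attraction, conflict, and resolution.",
--         "family bonds": "A story exploring family relationships, traditions, conflicts, and unconditional love. Include specific family dynamics and generational perspectives.",
--         "artistic journey": "A story about creative expression, artistic struggle, and breakthrough moments. Include specific artistic challenges, inspiration, and the creative process.",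
--         "innovation": "A story about problem-solving, invention, and bringing new ideas to life. Include specific technical challenges, creative solutions, and implementation."
--     }
--
--     def score(key):
--         if key in topic_lower:
--             return 2
--         if any(word in topic_lower for word in key.split()):
--             return 1
--         return 0
--
--     # One max-selection pass: strict '>' keeps the earliest entry of each score,
--     # so a full-key match anywhere outranks any word match, ties by table order.
--     best = (0, None)
--     for key, context in topic_contexts.items():
--         s = score(key)
--         if s > best[0]:
--             best = (s, context)
--     if best[1] is not None:
--         return best[1]
--
--     # Generic themes as data: (trigger words, prefix, suffix).
--     themes = [
--         (['journey', 'adventure', 'travel', 'exploration'],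
--          "An adventure story specifically about ",
--          ". Include unique challenges, discoveries, and transformative experiences that are specific to this particular journey."),
--         (['love', 'relationship', 'romance', 'connection'],
--          "A relationship story specifically about ",
--          ". Include authentic emotional moments, personal growth, and the unique aspects of this particular relationship dynamic."),
--         (['fear', 'courage', 'overcome', 'challenge'],
--          "A story of personal growth specifically about ",
--          ". Include the emotional journey, specific obstacles, and moments of breakthrough and transformation."),
--     ]
--     for words, prefix, suffix in themes:
--         if any(word in topic_lower for word in words):
--             return prefix + story_topic + suffix
--
--     return ("A unique story specifically about " + story_topic
--             + ". Include distinctive elements, specific scenarios, and detailed imagery that could only apply to "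
--             + story_topic + ". Make every aspect of the story directly relevant to this particular topic.")
-- ===== Notes on version B (the rewrite author's own statement) =====
-- stated objective: alternative
-- what changed: Replaces A's two sequential scans of topic_contexts with a single max-selection pass that scores each entry (2 = full-key substring, 1 = word match) and keeps the earliest best-scoring context, and replaces A's fallback if/elif chain with a data-driven loop over a list of (trigger-words, prefix, suffix) theme rows.
import Mathlib
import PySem

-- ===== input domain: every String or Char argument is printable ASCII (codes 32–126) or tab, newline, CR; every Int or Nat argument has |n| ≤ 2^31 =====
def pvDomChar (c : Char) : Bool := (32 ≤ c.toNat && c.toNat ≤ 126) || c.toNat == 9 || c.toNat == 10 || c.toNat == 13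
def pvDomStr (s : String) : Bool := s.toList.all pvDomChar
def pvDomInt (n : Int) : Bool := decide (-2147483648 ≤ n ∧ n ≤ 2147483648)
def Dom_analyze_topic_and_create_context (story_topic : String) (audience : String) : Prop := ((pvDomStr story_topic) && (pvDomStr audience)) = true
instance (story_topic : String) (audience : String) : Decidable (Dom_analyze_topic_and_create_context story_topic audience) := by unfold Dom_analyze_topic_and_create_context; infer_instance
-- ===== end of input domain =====

-- B replaces A's two sequential scans of the context table by one max-selection pass over
-- scored entries, and A's fallback if/elif chain by a loop over theme rows held as data;
-- objective: alternative (same cost, different algorithm shape).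

-- the topic_contexts dict (insertion order), the data both programs carry
def pvContexts : List (String × String) := [
  ("hero's journey", "A transformative adventure where an ordinary person faces extraordinary challenges and emerges changed. Include specific trials, mentors, and moments of self-discovery."),
  ("overcoming fear", "A deeply personal story about confronting specific fears and finding courage. Include the physical and emotional experience of fear, and the moment of breakthrough."),
  ("friendship", "An authentic story about human connection, loyalty, and mutual support. Include specific moments of bonding, conflict resolution, and shared experiences."),
  ("finding purpose", "A journey of self-discovery and meaning-making. Include moments of confusion, exploration, breakthrough insights, and purposeful action."),
  ("travel adventure", "A specific journey to a real or imagined place with unique challenges and discoveries. Include cultural encounters, unexpected obstacles, and transformative experiences."),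
  ("survival story", "A gripping tale of overcoming extreme circumstances using wit, determination, and resourcefulness. Include specific survival challenges and problem-solving moments."),
  ("love story", "An authentic romance focusing on emotional connection, personal growth, and relationship challenges. Include specific moments of attraction, conflict, and resolution."),
  ("family bonds", "A story exploring family relationships, traditions, conflicts, and unconditional love. Include specific family dynamics and generational perspectives."),
  ("artistic journey", "A story about creative expression, artistic struggle, and breakthrough moments. Include specific artistic challenges, inspiration, and the creative process."),
  ("innovation", "A story about problem-solving, invention, and bringing new ideas to life. Include specific technical challenges, creative solutions, and implementation.")]

-- ===== PORT A =====
-- A's first loop: first key with 'key in topic_lower'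
def pvFindFull (topic_lower : String) : List (String × String) → Option String
  | [] => none
  | (k, c) :: rest => if PySem.Str.isIn k topic_lower then some c else pvFindFull topic_lower rest

-- A's second loop: first key with 'any(word in topic_lower for word in key.split())'
def pvFindPartial (topic_lower : String) : List (String × String) → Option String
  | [] => none
  | (k, c) :: rest =>
      if (PySem.Str.split₀ k).any (fun w => PySem.Str.isIn w topic_lower) then some c
      else pvFindPartial topic_lower rest

def analyze_topic_and_create_context (story_topic : String) (audience : String) : String :=
  let topic_lower := PySem.Str.lower story_topic
  match pvFindFull topic_lower pvContexts with
  | some c => c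
  | none =>
    match pvFindPartial topic_lower pvContexts with
    | some c => c
    | none =>
      -- A's if/elif chain of generic themes (f-strings become concatenations)
      if ["journey", "adventure", "travel", "exploration"].any (fun w => PySem.Str.isIn w topic_lower) then
        "An adventure story specifically about " ++ story_topic ++ ". Include unique challenges, discoveries, and transformative experiences that are specific to this particular journey."
      else if ["love", "relationship", "romance", "connection"].any (fun w => PySem.Str.isIn w topic_lower) then
        "A relationship story specifically about " ++ story_topic ++ ". Include authentic emotional moments, personal growth, and the unique aspects of this particular relationship dynamic."
      else if ["fear", "courage", "overcome", "challenge"].any (fun w => PySem.Str.isIn w topic_lower) then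
        "A story of personal growth specifically about " ++ story_topic ++ ". Include the emotional journey, specific obstacles, and moments of breakthrough and transformation."
      else
        "A unique story specifically about " ++ story_topic ++ ". Include distinctive elements, specific scenarios, and detailed imagery that could only apply to " ++ story_topic ++ ". Make every aspect of the story directly relevant to this particular topic."

-- ===== PORT B =====
-- B's entry score: 2 = full-key substring, 1 = word-level match, 0 = no match
def pvScore (topic_lower : String) (key : String) : Nat :=
  if PySem.Str.isIn key topic_lower then 2
  else if (PySem.Str.split₀ key).any (fun w => PySem.Str.isIn w topic_lower) then 1
  else 0

-- B's single max-selection pass: strict '>' keeps the earliest entry of each score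
def pvBest (topic_lower : String) (kvs : List (String × String)) : Nat × Option String :=
  kvs.foldl
    (fun best kc =>
      if pvScore topic_lower kc.1 > best.1 then (pvScore topic_lower kc.1, some kc.2) else best)
    (0, none)

-- B's theme rows: (trigger words, prefix, suffix)
def pvThemeRows : List (List String × String × String) := [
  (["journey", "adventure", "travel", "exploration"],
   "An adventure story specifically about ",
   ". Include unique challenges, discoveries, and transformative experiences that are specific to this particular journey."),
  (["love", "relationship", "romance", "connection"],
   "A relationship story specifically about ",
   ". Include authentic emotional moments, personal growth, and the unique aspects of this particular relationship dynamic."),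
  (["fear", "courage", "overcome", "challenge"],
   "A story of personal growth specifically about ",
   ". Include the emotional journey, specific obstacles, and moments of breakthrough and transformation.")]

-- B's theme loop: first row whose trigger words hit, else the default sentence
def pvThemeFind (story_topic : String) (topic_lower : String) : List (List String × String × String) → String
  | [] =>
      "A unique story specifically about " ++ story_topic ++ ". Include distinctive elements, specific scenarios, and detailed imagery that could only apply to " ++ story_topic ++ ". Make every aspect of the story directly relevant to this particular topic."
  | (words, pre, suf) :: rest =>
      if words.any (fun w => PySem.Str.isIn w topic_lower) then pre ++ story_topic ++ suf
      else pvThemeFind story_topic topic_lower rest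

def analyze_topic_and_create_context_alt (story_topic : String) (audience : String) : String :=
  let topic_lower := PySem.Str.lower story_topic
  match (pvBest topic_lower pvContexts).2 with
  | some c => c
  | none => pvThemeFind story_topic topic_lower pvThemeRows

-- ===== PRECONDITION & SPEC =====
def Spec_analyze_topic_and_create_context (story_topic : String) (audience : String) (out : String) : Prop := out = analyze_topic_and_create_context_alt story_topic audience
instance (story_topic : String) (audience : String) (out : String) : Decidable (Spec_analyze_topic_and_create_context story_topic audience out) := by unfold Spec_analyze_topic_and_create_context; infer_instance

-- ===== CLAIM (what is proved, stated in full; the proofs are below) =====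
def Claim_equal_analyze_topic_and_create_context : Prop := ∀ (story_topic : String) (audience : String), Dom_analyze_topic_and_create_context story_topic audience → Spec_analyze_topic_and_create_context story_topic audience (analyze_topic_and_create_context story_topic audience)

-- ===== LEMMAS AND PROOFS =====
-- abbreviation for B's fold step
def pvStep (tl : String) (best : Nat × Option String) (kc : String × String) : Nat × Option String :=
  if pvScore tl kc.1 > best.1 then (pvScore tl kc.1, some kc.2) else best

theorem pvBest_eq_foldl (tl : String) (kvs : List (String × String)) :
    pvBest tl kvs = kvs.foldl (pvStep tl) (0, none) := rfl

theorem pvScore_le_two (tl k : String) : pvScore tl k ≤ 2 := by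
  unfold pvScore; split_ifs <;> omega

theorem pvScore_full (tl k : String) (hf : PySem.Str.isIn k tl = true) :
    pvScore tl k = 2 := by
  unfold pvScore; rw [if_pos hf]

theorem pvScore_word (tl k : String) (hf : ¬ PySem.Str.isIn k tl = true)
    (hw : ((PySem.Str.split₀ k).any fun w => PySem.Str.isIn w tl) = true) :
    pvScore tl k = 1 := by
  unfold pvScore; rw [if_neg hf, if_pos hw]

theorem pvScore_none (tl k : String) (hf : ¬ PySem.Str.isIn k tl = true)
    (hw : ¬ ((PySem.Str.split₀ k).any fun w => PySem.Str.isIn w tl) = true) :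
    pvScore tl k = 0 := by
  unfold pvScore; rw [if_neg hf, if_neg hw]

theorem pvFindFull_cons (tl k c : String) (rest : List (String × String)) :
    pvFindFull tl ((k, c) :: rest) = if PySem.Str.isIn k tl then some c else pvFindFull tl rest := rfl

theorem pvFindPartial_cons (tl k c : String) (rest : List (String × String)) :
    pvFindPartial tl ((k, c) :: rest) =
      if (PySem.Str.split₀ k).any (fun w => PySem.Str.isIn w tl) then some c
      else pvFindPartial tl rest := rfl

theorem pvStep_gt (tl : String) (b : Nat) (ctx : Option String) (k c : String)
    (h : pvScore tl k > b) : pvStep tl (b, ctx) (k, c) = (pvScore tl k, some c) := by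
  unfold pvStep; rw [if_pos h]

theorem pvStep_le (tl : String) (b : Nat) (ctx : Option String) (k c : String)
    (h : ¬ pvScore tl k > b) : pvStep tl (b, ctx) (k, c) = (b, ctx) := by
  unfold pvStep; rw [if_neg h]

-- once the score is 2, nothing ever replaces it
theorem pvFold_two (tl : String) (kvs : List (String × String)) (ctx : Option String) :
    kvs.foldl (pvStep tl) (2, ctx) = (2, ctx) := by
  induction kvs with
  | nil => rfl
  | cons kc rest ih =>
    obtain ⟨k, c⟩ := kc
    have h : ¬ pvScore tl k > 2 := by have := pvScore_le_two tl k; omega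
    rw [List.foldl_cons, pvStep_le tl 2 ctx k c h, ih]

-- from score 1, the only possible replacement is the first full match
theorem pvFold_one (tl : String) (kvs : List (String × String)) (ctx : Option String) :
    kvs.foldl (pvStep tl) (1, ctx) =
      match pvFindFull tl kvs with
      | some c => (2, some c)
      | none => (1, ctx) := by
  induction kvs with
  | nil => rfl
  | cons kc rest ih =>
    obtain ⟨k, c⟩ := kc
    by_cases hf : PySem.Str.isIn k tl = true
    · have hs := pvScore_full tl k hf
      have hgt : pvScore tl k > 1 := by omega
      rw [List.foldl_cons, pvStep_gt tl 1 ctx k c hgt, hs, pvFold_two,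
        pvFindFull_cons, if_pos hf]
    · have hle : pvScore tl k ≤ 1 := by
        by_cases hw : ((PySem.Str.split₀ k).any fun w => PySem.Str.isIn w tl) = true
        · rw [pvScore_word tl k hf hw]
        · rw [pvScore_none tl k hf hw]; omega
      have h1 : ¬ pvScore tl k > 1 := by omega
      rw [List.foldl_cons, pvStep_le tl 1 ctx k c h1, ih, pvFindFull_cons, if_neg hf]

-- from the initial state, the pass yields the first full match, else the first word match
theorem pvFold_zero (tl : String) (kvs : List (String × String)) :
    kvs.foldl (pvStep tl) (0, none) =
      match pvFindFull tl kvs with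
      | some c => (2, some c)
      | none =>
        match pvFindPartial tl kvs with
        | some c => (1, some c)
        | none => (0, none) := by
  induction kvs with
  | nil => rfl
  | cons kc rest ih =>
    obtain ⟨k, c⟩ := kc
    by_cases hf : PySem.Str.isIn k tl = true
    · have hs := pvScore_full tl k hf
      have hgt : pvScore tl k > 0 := by omega
      rw [List.foldl_cons, pvStep_gt tl 0 none k c hgt, hs, pvFold_two,
        pvFindFull_cons, if_pos hf]
    · by_cases hw : ((PySem.Str.split₀ k).any fun w => PySem.Str.isIn w tl) = true
      · have hs := pvScore_word tl k hf hw
        have hgt : pvScore tl k > 0 := by omega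
        rw [List.foldl_cons, pvStep_gt tl 0 none k c hgt, hs, pvFold_one,
          pvFindFull_cons, if_neg hf, pvFindPartial_cons, if_pos hw]
      · have hs := pvScore_none tl k hf hw
        have h0 : ¬ pvScore tl k > 0 := by omega
        rw [List.foldl_cons, pvStep_le tl 0 none k c h0, ih,
          pvFindFull_cons, if_neg hf, pvFindPartial_cons, if_neg hw]

-- ===== VERDICT (by name: the statement is the Claim_ definition above) =====
theorem analyze_topic_and_create_context_spec : Claim_equal_analyze_topic_and_create_context := by
  intro story_topic audience _
  unfold Spec_analyze_topic_and_create_context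
  simp only [analyze_topic_and_create_context, analyze_topic_and_create_context_alt,
    pvBest_eq_foldl, pvFold_zero]
  cases pvFindFull (PySem.Str.lower story_topic) pvContexts <;>
    cases pvFindPartial (PySem.Str.lower story_topic) pvContexts <;>
      simp [pvThemeFind, pvThemeRows]
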